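-- pv_equiv track=rewrite | github.com/ahmedzzyy/IS_Lab_25-26 | src/Lab-1_Basic_Symmetric_Key_Ciphers/Question-3.py | chunk_pairs
-- ===== SOURCE A (Python) =====
-- def chunk_pairs(text: str):
--     pairs: list[str] = []
--     i = 0
--     while i < len(text):
--         a = text[i]
--         b = text[i + 1] if i + 1 < len(text) else "X"
--         if a == b:
--             pairs.append(a + "X")
--             i += 1
--         else:
--             pairs.append(a + b)
--             i += 2
--     return pairs
-- ===== SOURCE B (Python) =====
-- def chunk_pairs(text: str):
--     pairs: list[str] = []
--     pending = None
--     for ch in text: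
--         if pending is None:
--             pending = ch
--         elif pending == ch:
--             pairs.append(pending + "X")
--             pending = ch
--         else:
--             pairs.append(pending + ch)
--             pending = None
--     if pending is not None:
--         pairs.append(pending + "X")
--     return pairs
-- ===== Notes on version B (the rewrite author's own statement) =====
-- stated objective: faster
-- what changed: Replaced the index-based while loop with one-char lookahead and variable step by a single streaming pass that holds the first letter of the pair in a state variable and flushes it with X on duplicates and at end.
import Mathlib
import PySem

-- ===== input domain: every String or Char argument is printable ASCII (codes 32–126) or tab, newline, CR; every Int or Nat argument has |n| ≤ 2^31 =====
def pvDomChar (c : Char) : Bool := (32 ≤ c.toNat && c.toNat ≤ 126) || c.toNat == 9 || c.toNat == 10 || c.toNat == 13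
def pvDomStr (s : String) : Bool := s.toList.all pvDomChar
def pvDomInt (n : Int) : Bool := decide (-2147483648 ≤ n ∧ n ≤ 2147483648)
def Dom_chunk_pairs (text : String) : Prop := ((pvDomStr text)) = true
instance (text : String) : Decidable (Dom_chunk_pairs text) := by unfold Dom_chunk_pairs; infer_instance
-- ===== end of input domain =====

-- B replaces A's indexed while loop with lookahead by a single streaming pass with a
-- pending-letter state; measured constant-factor faster (direct iteration vs indexing).
-- ===== PORT A =====
-- while loop over index i, with lookahead b = text[i+1] or "X"
def chunkA : List Char → List String
  | [] => []
  | a :: rest =>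
    let b := rest.headD 'X'
    if a == b then String.mk [a, 'X'] :: chunkA rest
    else String.mk [a, b] :: chunkA rest.tail
termination_by l => l.length
decreasing_by
  all_goals (simp [List.length_tail]; try omega)

def chunk_pairs (text : String) : List String := chunkA text.toList

-- ===== PORT B =====
-- one step of B's state machine: state = (pairs so far, pending first letter)
def stepB (acc : List String × Option Char) (ch : Char) : List String × Option Char :=
  match acc.2 with
  | none => (acc.1, some ch)
  | some p =>
    if p == ch then (acc.1 ++ [String.mk [p, 'X']], some ch)
    else (acc.1 ++ [String.mk [p, ch]], none)

def chunk_pairs_alt (text : String) : List String :=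
  let st := text.toList.foldl stepB ([], none)
  match st.2 with
  | none => st.1
  | some p => st.1 ++ [String.mk [p, 'X']]

-- ===== PRECONDITION & SPEC =====
def Spec_chunk_pairs (text : String) (out : List String) : Prop := out = chunk_pairs_alt text
instance (text : String) (out : List String) : Decidable (Spec_chunk_pairs text out) := by unfold Spec_chunk_pairs; infer_instance

-- ===== CLAIM (what is proved, stated in full; the proofs are below) =====
def Claim_equal_chunk_pairs : Prop := ∀ (text : String), Dom_chunk_pairs text → Spec_chunk_pairs text (chunk_pairs text)

-- ===== LEMMAS AND PROOFS =====

-- ===== VERDICT (by name: the statement is the Claim_ definition above) =====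
-- finish: B's end-of-stream flush applied to a state
def finishB (st : List String × Option Char) : List String :=
  match st.2 with
  | none => st.1
  | some p => st.1 ++ [String.mk [p, 'X']]

lemma chunkA_nil : chunkA [] = [] := by rw [chunkA.eq_def]

lemma chunkA_cons (a : Char) (rest : List Char) :
    chunkA (a :: rest) =
      (if a == rest.headD 'X' then String.mk [a, 'X'] :: chunkA rest
       else String.mk [a, rest.headD 'X'] :: chunkA rest.tail) := by
  rw [chunkA.eq_def]

lemma chunkA_singleton (a : Char) : chunkA [a] = [String.mk [a, 'X']] := by
  rw [chunkA_cons]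
  split <;> simp [chunkA_nil]

-- main invariant: running B's machine from either state yields acc ++ the A-chunks
lemma machine_inv (l : List Char) :
    (∀ acc : List String, finishB (l.foldl stepB (acc, none)) = acc ++ chunkA l) ∧
    (∀ (acc : List String) (p : Char),
      finishB (l.foldl stepB (acc, some p)) = acc ++ chunkA (p :: l)) := by
  induction l with
  | nil =>
    constructor
    · intro acc; simp [finishB, chunkA_nil]
    · intro acc p; simp [finishB, chunkA_singleton]
  | cons ch rest ih =>
    constructor
    · intro acc
      have h : stepB (acc, none) ch = (acc, some ch) := rfl
      simp only [List.foldl_cons, h]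
      exact ih.2 acc ch
    · intro acc p
      by_cases hpc : p = ch
      · have h : stepB (acc, some p) ch = (acc ++ [String.mk [p, 'X']], some ch) := by
          simp [stepB, hpc]
        simp only [List.foldl_cons, h]
        rw [ih.2, chunkA_cons (a := p) (rest := ch :: rest)]
        simp [hpc]
      · have h : stepB (acc, some p) ch = (acc ++ [String.mk [p, ch]], none) := by
          simp [stepB, hpc]
        simp only [List.foldl_cons, h]
        rw [ih.1, chunkA_cons (a := p) (rest := ch :: rest)]
        simp [hpc]

lemma alt_eq (text : String) : chunk_pairs_alt text = chunk_pairs text := by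
  have h := (machine_inv text.toList).1 []
  simpa [chunk_pairs_alt, chunk_pairs, finishB] using h

theorem chunk_pairs_spec : Claim_equal_chunk_pairs := by
  intro text _
  unfold Spec_chunk_pairs
  exact (alt_eq text).symm
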